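-- pv_equiv track=rewrite | github.com/tbrosh23/project-chessnut | chesstest.py | get_score_black
-- ===== SOURCE A (Python) =====
-- def get_score_black(fen):
--     status = fen.split()[0]
--     pieces = ['r','n','b','q','p']
--     values = [5,3,3,9,1]
--     score = 0
--     piece_num = 0
--     for piece in pieces:
--         for i in status:
--             if i==piece:
--                 score += values[piece_num]
--         piece_num +=1
--
--     return score
-- ===== SOURCE B (Python) =====
-- def get_score_black(fen):
--     status = fen.split()[0]
--     values = {'r': 5, 'n': 3, 'b': 3, 'q': 9, 'p': 1}
--     score = 0
--     for ch in status:
--         score += values.get(ch, 0)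
--     return score
-- ===== Notes on version B (the rewrite author's own statement) =====
-- stated objective: simpler
-- what changed: Replaced the five rescans of the board string (one per piece type) by a single pass with a piece->value table and a default of 0.
import Mathlib
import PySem

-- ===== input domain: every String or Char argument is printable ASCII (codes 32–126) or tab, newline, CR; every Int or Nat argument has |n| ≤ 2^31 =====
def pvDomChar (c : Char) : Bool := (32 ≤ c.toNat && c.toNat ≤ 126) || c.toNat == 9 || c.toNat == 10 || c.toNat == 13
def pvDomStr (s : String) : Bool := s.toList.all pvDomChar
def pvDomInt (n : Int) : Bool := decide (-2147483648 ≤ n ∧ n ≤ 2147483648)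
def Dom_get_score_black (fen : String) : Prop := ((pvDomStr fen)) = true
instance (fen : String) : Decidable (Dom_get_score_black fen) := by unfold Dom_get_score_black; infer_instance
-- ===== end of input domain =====

-- B replaces A's five rescans of the board string by one pass with a piece->value table (objective: simpler).

-- ===== PORT A =====
def get_score_black (fen : String) : Int :=
  let status := ((PySem.Str.split₀ fen).headD "").toList
  let pieces := ['r', 'n', 'b', 'q', 'p']
  let values : List Int := [5, 3, 3, 9, 1]
  let res := pieces.foldl (fun (st : Int × Int) piece =>
      let score := status.foldl (fun s i =>
          if i = piece then s + PySem.List.pyGetD values st.2 0 else s) st.1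
      (score, st.2 + 1)) (0, 0)
  res.1

-- ===== PORT B =====
def get_score_black_alt (fen : String) : Int :=
  let status := ((PySem.Str.split₀ fen).headD "").toList
  let values : PySem.Dict Char Int :=
    PySem.Dict.ofList [('r', 5), ('n', 3), ('b', 3), ('q', 9), ('p', 1)]
  status.foldl (fun score ch => score + values.getD ch 0) 0

-- ===== PRECONDITION & SPEC =====
-- Pre_ excludes exactly the whitespace-only/empty strings, on which A's fen.split()[0] raises IndexError.
def Pre_get_score_black (fen : String) : Prop := PySem.Str.split₀ fen ≠ []
instance (fen : String) : Decidable (Pre_get_score_black fen) := by unfold Pre_get_score_black; infer_instance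
def pvWitness_get_score_black : String := "rnb q"
def Spec_get_score_black (fen : String) (out : Int) : Prop := out = get_score_black_alt fen
instance (fen : String) (out : Int) : Decidable (Spec_get_score_black fen out) := by unfold Spec_get_score_black; infer_instance

-- ===== CLAIM (what is proved, stated in full; the proofs are below) =====
def Claim_equal_get_score_black : Prop := ∀ (fen : String), Dom_get_score_black fen → Pre_get_score_black fen → Spec_get_score_black fen (get_score_black fen)

-- ===== LEMMAS AND PROOFS =====

-- A's inner loop adds v once per occurrence of the piece.
theorem pvCountLoop (l : List Char) (p : Char) (v a : Int) :
    l.foldl (fun s i => if i = p then s + v else s) a = a + v * (l.count p) := by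
  induction l generalizing a with
  | nil => simp
  | cons c t ih =>
    simp only [List.foldl_cons, List.count_cons, ih]
    by_cases h : c = p
    · simp [h]; push_cast; ring
    · simp [h]

-- B's single pass sums the table values, i.e. the same weighted counts.
theorem pvSumLoop (l : List Char) (a : Int) :
    l.foldl (fun score ch =>
        score + (PySem.Dict.ofList [('r', (5:Int)), ('n', 3), ('b', 3), ('q', 9), ('p', 1)]).getD ch 0) a
      = a + 5 * l.count 'r' + 3 * l.count 'n' + 3 * l.count 'b' + 9 * l.count 'q' + 1 * l.count 'p' := by
  induction l generalizing a with
  | nil => simp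
  | cons c t ih =>
    simp only [List.foldl_cons, List.count_cons, ih]
    have hmk : PySem.Dict.ofList [('r', (5:Int)), ('n', 3), ('b', 3), ('q', 9), ('p', 1)]
        = PySem.Dict.mk [('r', 5), ('n', 3), ('b', 3), ('q', 9), ('p', 1)] := by rfl
    by_cases hr : c = 'r'
    · subst hr; rw [show (PySem.Dict.ofList [('r', (5:Int)), ('n', 3), ('b', 3), ('q', 9), ('p', 1)]).getD 'r' 0 = 5 from rfl]
      simp; push_cast; ring
    by_cases hn : c = 'n'
    · subst hn; rw [show (PySem.Dict.ofList [('r', (5:Int)), ('n', 3), ('b', 3), ('q', 9), ('p', 1)]).getD 'n' 0 = 3 from rfl]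
      simp <;> push_cast <;> ring
    by_cases hb : c = 'b'
    · subst hb; rw [show (PySem.Dict.ofList [('r', (5:Int)), ('n', 3), ('b', 3), ('q', 9), ('p', 1)]).getD 'b' 0 = 3 from rfl]
      simp <;> push_cast <;> ring
    by_cases hq : c = 'q'
    · subst hq; rw [show (PySem.Dict.ofList [('r', (5:Int)), ('n', 3), ('b', 3), ('q', 9), ('p', 1)]).getD 'q' 0 = 9 from rfl]
      simp <;> push_cast <;> ring
    by_cases hp : c = 'p'
    · subst hp; rw [show (PySem.Dict.ofList [('r', (5:Int)), ('n', 3), ('b', 3), ('q', 9), ('p', 1)]).getD 'p' 0 = 1 from rfl]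
      simp <;> push_cast <;> ring
    · have h0 : (PySem.Dict.ofList [('r', (5:Int)), ('n', 3), ('b', 3), ('q', 9), ('p', 1)]).getD c 0 = 0 := by
        rw [hmk, PySem.Dict.getD_eq_get?_getD]
        simp [Ne.symm hr, Ne.symm hn, Ne.symm hb, Ne.symm hq, Ne.symm hp,
          PySem.Dict.get?]
      rw [h0]
      simp [hr, hn, hb, hq, hp]

-- ===== VERDICT (by name: the statement is the Claim_ definition above) =====
theorem get_score_black_spec : Claim_equal_get_score_black := by
  intro fen _ _
  unfold Spec_get_score_black get_score_black get_score_black_alt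
  simp only [List.foldl_cons, List.foldl_nil]
  norm_num [pvCountLoop, pvSumLoop, PySem.List.pyGetD, PySem.List.pyIdx?, List.getD, Int.toNat,
    List.getElem_cons_zero, List.getElem_cons_succ]
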